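-- pv_equiv track=rewrite | github.com/Georgy-user/9.-Instr_func_progr | module_9_6.py | all_variants
-- ===== SOURCE A (Python) =====
-- def all_variants(text):
--     for i in range(1, len(text) + 1):
--         for j in range(len(text)):
--             subseq = text[j:j + i]
--             if len(subseq) == i:
--                 yield subseq
--             else:
--                 continue
-- ===== SOURCE B (Python) =====
-- def all_variants(text):
--     n = len(text)
--     subs = [text[j:j + i] for j in range(n) for i in range(1, n - j + 1)]
--     for s in sorted(subs, key=len):
--         yield s
-- ===== Notes on version B (the rewrite author's own statement) =====
-- stated objective: alternative
-- what changed: B generates substrings start-index-outer as one comprehension and then stably sorts them by length, instead of A's length-outer loop that filters out short window slices; equal by stability of Python's sort.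
import Mathlib
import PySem

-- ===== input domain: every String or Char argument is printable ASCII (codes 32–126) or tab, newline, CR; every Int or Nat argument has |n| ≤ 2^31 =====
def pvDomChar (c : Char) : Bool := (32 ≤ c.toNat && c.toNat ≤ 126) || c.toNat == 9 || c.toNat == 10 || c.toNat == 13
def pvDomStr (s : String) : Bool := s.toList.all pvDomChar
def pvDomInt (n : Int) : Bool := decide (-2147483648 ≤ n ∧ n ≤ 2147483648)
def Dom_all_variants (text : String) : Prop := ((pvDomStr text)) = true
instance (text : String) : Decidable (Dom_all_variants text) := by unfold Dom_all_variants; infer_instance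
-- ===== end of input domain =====

-- B replaces A's length-outer loop (which filters out short window slices) by one start-outer
-- comprehension of all substrings followed by a stable sort on length; equal by sort stability.

-- shared helper: the Python expression text[j:j+i]
def pvSub (text : String) (j i : Int) : String :=
  PySem.Str.slice text (some j) (some (j + i))

-- ===== PORT A =====
def all_variants (text : String) : List String :=
  (PySem.List.pyRange 1 (PySem.Str.len text + 1)).foldl (fun acc i =>
    (PySem.List.pyRange 0 (PySem.Str.len text)).foldl (fun acc2 j =>
      let subseq := pvSub text j i
      if PySem.Str.len subseq = i then acc2 ++ [subseq] else acc2) acc) []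

-- ===== PORT B =====
def all_variants_alt (text : String) : List String :=
  let n := PySem.Str.len text
  let subs := (PySem.List.pyRange 0 n).foldl (fun acc j =>
    (PySem.List.pyRange 1 (n - j + 1)).foldl (fun acc2 i =>
      acc2 ++ [pvSub text j i]) acc) []
  PySem.List.sorted subs (fun s => PySem.Str.len s)

-- ===== PRECONDITION & SPEC =====
def Spec_all_variants (text : String) (out : List String) : Prop := out = all_variants_alt text
instance (text : String) (out : List String) : Decidable (Spec_all_variants text out) := by unfold Spec_all_variants; infer_instance

-- ===== CLAIM (what is proved, stated in full; the proofs are below) =====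
def Claim_equal_all_variants : Prop := ∀ (text : String), Dom_all_variants text → Spec_all_variants text (all_variants text)

-- ===== LEMMAS AND PROOFS =====

-- (l.filter p).map f as a flatMap, to put both programs' rows in one shape
theorem pv_filter_map_eq_flatMap {α β : Type} (p : α → Bool) (f : α → β) (l : List α) :
    (l.filter p).map f = l.flatMap (fun x => if p x then [f x] else []) := by
  induction l with
  | nil => simp
  | cons a l ih => by_cases h : p a <;> simp [h, ih]

-- filtering a flatMap filters each group
theorem pv_filter_flatMap {α β : Type} (p : β → Bool) (g : α → List β) (l : List α) :
    (l.flatMap g).filter p = l.flatMap (fun x => (g x).filter p) := by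
  induction l with
  | nil => simp
  | cons a l ih => simp [List.flatMap_cons, List.filter_append, ih]

-- insertion into a split list: below the insertion point nothing triggers, above everything does
theorem pv_insertBy_split {α : Type} (before : α → α → Bool) (x : α) (A B : List α)
    (hA : ∀ a ∈ A, before x a = false) (hB : ∀ b ∈ B, before x b = true) :
    PySem.List.insertBy before x (A ++ B) = A ++ x :: B := by
  induction A with
  | nil =>
    cases B with
    | nil => simp [PySem.List.insertBy]
    | cons b B' => simp [PySem.List.insertBy, hB b (by simp)]
  | cons a A' ih =>
    have ha : before x a = false := hA a (by simp)
    simp only [List.cons_append, PySem.List.insertBy, ha, Bool.false_eq_true, if_false]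
    exact congrArg (a :: ·) (ih (fun a' ha' => hA a' (by simp [ha'])))

-- a stable sort on small nonnegative Int keys is the concatenation of the key buckets
theorem pv_stable_buckets {α : Type} (key : α → Int) (xs : List α) (m : Nat)
    (h : ∀ x ∈ xs, 0 ≤ key x ∧ key x < (m : Int)) :
    PySem.List.sorted xs key =
      (List.range m).flatMap (fun (k : Nat) => xs.filter (fun x => key x == ((k : Nat) : Int))) := by
  induction xs using List.reverseRecOn with
  | nil => rw [PySem.List.sorted_eq_foldl_insertBy]; simp
  | append_singleton ys x ih =>
    have hx := h x (by simp)
    have hys : ∀ y ∈ ys, 0 ≤ key y ∧ key y < (m : Int) := fun y hy => h y (by simp [hy])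
    rw [PySem.List.sorted_eq_foldl_insertBy, List.foldl_append, List.foldl_cons, List.foldl_nil,
      ← PySem.List.sorted_eq_foldl_insertBy, ih hys]
    have hkey : key x = (((key x).toNat : Nat) : Int) := by omega
    set k0 := (key x).toNat with hk0
    have hm : m = (k0 + 1) + (m - (k0 + 1)) := by omega
    rw [hm, List.range_add, List.flatMap_append, List.flatMap_append]
    rw [pv_insertBy_split (fun a b => decide (key a < key b)) x _ _
      (by
        intro a haA
        simp only [List.mem_flatMap, List.mem_range, List.mem_filter] at haA
        obtain ⟨k, hk, _, hka⟩ := haA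
        simp only [beq_iff_eq] at hka
        simp only [decide_eq_false_iff_not, not_lt, hka]
        omega)
      (by
        intro b hbB
        simp only [List.mem_flatMap, List.mem_map, List.mem_range, List.mem_filter] at hbB
        obtain ⟨k, ⟨t, ht, hkt⟩, _, hkb⟩ := hbB
        simp only [beq_iff_eq] at hkb
        simp only [decide_eq_true_eq, hkb]
        omega)]
    -- now pure list algebra on the buckets
    have hfil : ∀ k : Nat, (ys ++ [x]).filter (fun y => key y == ((k : Nat) : Int)) =
        ys.filter (fun y => key y == ((k : Nat) : Int)) ++ (if k = k0 then [x] else []) := by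
      intro k
      rw [List.filter_append]
      congr 1
      by_cases hk : k = k0
      · subst hk; simp [hkey]
      · rw [if_neg hk]
        simp [hkey, Ne.symm hk]
    simp only [hfil]
    have h1 : (List.range (k0 + 1)).flatMap
        (fun (k : Nat) => ys.filter (fun y => key y == ((k : Nat) : Int)) ++ (if k = k0 then [x] else [])) =
        (List.range (k0 + 1)).flatMap (fun (k : Nat) => ys.filter (fun y => key y == ((k : Nat) : Int))) ++ [x] := by
      rw [List.range_succ, List.flatMap_append, List.flatMap_append]
      rw [List.flatMap_congr (g := fun (k : Nat) => ys.filter (fun y => key y == ((k : Nat) : Int)))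
        (by intro k hk; simp only [List.mem_range] at hk; rw [if_neg (by omega)]; simp)]
      simp
    have h2 : ((List.range (m - (k0 + 1))).map (fun t => (k0 + 1) + t)).flatMap
        (fun (k : Nat) => ys.filter (fun y => key y == ((k : Nat) : Int)) ++ (if k = k0 then [x] else [])) =
        ((List.range (m - (k0 + 1))).map (fun t => (k0 + 1) + t)).flatMap
        (fun (k : Nat) => ys.filter (fun y => key y == ((k : Nat) : Int))) := by
      apply List.flatMap_congr
      intro k hk
      simp only [List.mem_map, List.mem_range] at hk
      obtain ⟨t, ht, hkt⟩ := hk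
      rw [if_neg (by omega)]; simp
    rw [h1, h2]
    simp [List.append_assoc]

-- length of text[j:j+i] for nonnegative bounds
theorem pv_len_pvSub (text : String) (j i : Int) (hj : 0 ≤ j) (hi : 0 ≤ i)
    (hjn : j ≤ (text.toList.length : Int)) :
    PySem.Str.len (pvSub text j i) = min i ((text.toList.length : Int) - j) := by
  obtain ⟨jn, rfl⟩ : ∃ jn : Nat, j = (jn : Int) := ⟨j.toNat, by omega⟩
  obtain ⟨i', rfl⟩ : ∃ i' : Nat, i = (i' : Int) := ⟨i.toNat, by omega⟩
  have : (pvSub text (jn : Int) (i' : Int)).toList = (text.toList.drop jn).take i' := by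
    simp [pvSub, PySem.Str.toList_slice, PySem.Chars.slice_eq_listSlice,
      PySem.List.slice_natCast_add]
  rw [PySem.Str.len_eq, this]
  simp only [List.length_take, List.length_drop]
  omega

-- A in flatMap normal form
theorem pv_a_eq (text : String) :
    all_variants text = (PySem.List.pyRange 1 (PySem.Str.len text + 1)).flatMap (fun i =>
      ((PySem.List.pyRange 0 (PySem.Str.len text)).filter
        (fun j => decide (PySem.Str.len (pvSub text j i) = i))).map (fun j => pvSub text j i)) := by
  unfold all_variants
  simp only [PySem.List.foldl_append_ite, PySem.List.foldl_append_eq_flatMap, List.nil_append]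

-- B in flatMap normal form
theorem pv_alt_eq (text : String) :
    all_variants_alt text = PySem.List.sorted
      ((PySem.List.pyRange 0 (PySem.Str.len text)).flatMap (fun j =>
        (PySem.List.pyRange 1 (PySem.Str.len text - j + 1)).map (fun i => pvSub text j i)))
      (fun s => PySem.Str.len s) := by
  unfold all_variants_alt
  simp only [PySem.List.foldl_append_singleton_eq_map, PySem.List.foldl_append_eq_flatMap,
    List.nil_append]

-- filtering a range for one value
theorem pv_filter_pyRange (a b v : Int) :
    (PySem.List.pyRange a b).filter (fun i => i == v) =
      if a ≤ v ∧ v < b then [v] else [] := by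
  induction hn : (b - a).toNat generalizing a with
  | zero =>
    rw [PySem.List.pyRange_one_eq_nil (by omega), if_neg (by omega)]
    simp
  | succ n ih =>
    have hab : a < b := by omega
    rw [PySem.List.pyRange_one_cons hab, List.filter_cons, ih (a + 1) (by omega)]
    by_cases hv : a = v
    · subst hv
      rw [if_neg (show ¬(a + 1 ≤ a ∧ a < b) by omega)]
      simp [hab]
    · have h1 : (a == v) = false := by simp [hv]
      rw [h1]
      simp only [Bool.false_eq_true, if_false]
      exact if_congr (by omega) rfl rfl

theorem all_variants_eq (text : String) : all_variants text = all_variants_alt text := by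
  rw [pv_a_eq, pv_alt_eq]
  have hlen : PySem.Str.len text = (text.toList.length : Int) := PySem.Str.len_eq text
  set n : Nat := text.toList.length with hn
  -- every generated substring has length in [0, n]
  have hmemS : ∀ x ∈ (PySem.List.pyRange 0 (PySem.Str.len text)).flatMap (fun j =>
      (PySem.List.pyRange 1 (PySem.Str.len text - j + 1)).map (fun i => pvSub text j i)),
      0 ≤ PySem.Str.len x ∧ PySem.Str.len x < ((n + 1 : Nat) : Int) := by
    intro x hx
    simp only [List.mem_flatMap, List.mem_map, PySem.List.mem_pyRange_one, hlen] at hx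
    obtain ⟨j, ⟨hj0, hjn⟩, i, ⟨hi1, hin⟩, rfl⟩ := hx
    rw [pv_len_pvSub text j i hj0 (by omega) (by omega)]
    constructor <;> omega
  rw [pv_stable_buckets (fun s => PySem.Str.len s) _ (n + 1) hmemS]
  -- bucket 0 is empty: every substring in S has positive length
  have h0 : ((PySem.List.pyRange 0 (PySem.Str.len text)).flatMap (fun j =>
      (PySem.List.pyRange 1 (PySem.Str.len text - j + 1)).map (fun i => pvSub text j i))).filter
      (fun x => PySem.Str.len x == (((0 : Nat) : Nat) : Int)) = [] := by
    rw [List.filter_eq_nil_iff]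
    intro x hx
    simp only [List.mem_flatMap, List.mem_map, PySem.List.mem_pyRange_one, hlen] at hx
    obtain ⟨j, ⟨hj0, hjn⟩, i, ⟨hi1, hin⟩, rfl⟩ := hx
    rw [beq_iff_eq, pv_len_pvSub text j i hj0 (by omega) (by omega)]
    omega
  rw [List.range_succ_eq_map, List.flatMap_cons, h0, List.nil_append, List.flatMap_map]
  have hr : PySem.List.pyRange 1 (PySem.Str.len text + 1) =
      (List.range n).map (fun (k : Nat) => (((k + 1 : Nat)) : Int)) := by
    rw [PySem.List.pyRange_one]
    have hcnt : (PySem.Str.len text + 1 - 1).toNat = n := by rw [hlen]; omega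
    rw [hcnt]
    apply List.map_congr_left
    intro k _
    push_cast
    ring
  rw [hr, List.flatMap_map]
  apply List.flatMap_congr
  intro k hk
  simp only [List.mem_range] at hk
  -- row of A at length k+1 equals bucket k+1 of B's substring pool
  rw [pv_filter_map_eq_flatMap, pv_filter_flatMap]
  apply List.flatMap_congr
  intro j hj
  rw [PySem.List.mem_pyRange_one, hlen] at hj
  obtain ⟨hj0, hjn⟩ := hj
  rw [List.filter_map]
  have hpred : ∀ i ∈ PySem.List.pyRange 1 (PySem.Str.len text - j + 1),
      ((fun x => PySem.Str.len x == ((Nat.succ k : Nat) : Int)) ∘ fun i => pvSub text j i) i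
        = (i == ((Nat.succ k : Nat) : Int)) := by
    intro i hi
    rw [PySem.List.mem_pyRange_one, hlen] at hi
    obtain ⟨hi1, hin⟩ := hi
    simp only [Function.comp]
    rw [pv_len_pvSub text j i hj0 (by omega) (by omega)]
    have : min i ((n : Int) - j) = i := by omega
    rw [this]
  rw [List.filter_congr hpred, pv_filter_pyRange]
  simp only [decide_eq_true_eq]
  rw [pv_len_pvSub text j (((k + 1 : Nat)) : Int) hj0 (by omega) (by omega)]
  by_cases hc : (((k + 1 : Nat)) : Int) ≤ (n : Int) - j
  · rw [if_pos (by omega), if_pos (by rw [hlen]; constructor <;> omega)]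
    simp
  · rw [if_neg (by omega), if_neg (by rw [hlen]; omega)]
    simp

-- ===== VERDICT (by name: the statement is the Claim_ definition above) =====
theorem all_variants_spec : Claim_equal_all_variants := by
  intro text _
  unfold Spec_all_variants
  exact all_variants_eq text
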